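-- pv_equiv track=rewrite | github.com/flakepowders/2022-Spring-CS1-Final-Mock-Exam-Solutions | A03_mconcom.py | maxConsecutiveComposite
-- ===== SOURCE A (Python) =====
-- def isPrime(n):
--     if n <= 1:
--         return False
--     if n == 2:
--         return True
--     for i in range(2, int(n**0.5)+2):
--         if n % i == 0:
--             return False
--     return True
--
-- def maxConsecutiveComposite(n):
--     conscount = 0
--     # 현재 몇 번 연속으로 합성수가 나오는 중인지를 저장합니다.
--     result = 0
--     # conscount의 최대값, 즉 결과값을 저장합니다.
--     for i in range(2, n+1):
--         # 2부터 N까지 모든 수를 검사합니다.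
--         if isPrime(i):
--             conscount = 0
--             # 만약 i가 소수라면, 합성수가 끊긴 것이므로 conscount를 초기화합니다.
--             # i가 1인 경우는 아예 검사하지 않으므로 신경 쓰지 않아도 됩니다.
--         else:
--             conscount += 1
--             # 만약 i가 합성수라면, 합성수가 이어진 것이므로 conscount에 1을 더합니다.
--         if result < conscount:
--             result = conscount
--             # 결과값은 conscount의 최대값이어야 합니다.
--             # 즉, conscount가 result보다 크다면, result를 conscount로 갱신해 줍니다.
--     return result
-- ===== SOURCE B (Python) =====
-- def maxConsecutiveComposite(n):
--     # Sieve: mark every multiple of every j <= n//2, then one scan for the longest run.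
--     if n < 4:
--         return 0
--     comp = [False] * (n + 1)
--     for j in range(2, n // 2 + 1):
--         for k in range(2 * j, n + 1, j):
--             comp[k] = True
--     best = run = 0
--     for i in range(2, n + 1):
--         if comp[i]:
--             run += 1
--             best = max(best, run)
--         else:
--             run = 0
--     return best
-- ===== Notes on version B (the rewrite author's own statement) =====
-- stated objective: faster
-- what changed: Replaces per-number trial division (isPrime on every i up to n) by a sieve that marks every multiple of every j <= n//2 once, then a single scan of the composite flags for the longest run.
import Mathlib
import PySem

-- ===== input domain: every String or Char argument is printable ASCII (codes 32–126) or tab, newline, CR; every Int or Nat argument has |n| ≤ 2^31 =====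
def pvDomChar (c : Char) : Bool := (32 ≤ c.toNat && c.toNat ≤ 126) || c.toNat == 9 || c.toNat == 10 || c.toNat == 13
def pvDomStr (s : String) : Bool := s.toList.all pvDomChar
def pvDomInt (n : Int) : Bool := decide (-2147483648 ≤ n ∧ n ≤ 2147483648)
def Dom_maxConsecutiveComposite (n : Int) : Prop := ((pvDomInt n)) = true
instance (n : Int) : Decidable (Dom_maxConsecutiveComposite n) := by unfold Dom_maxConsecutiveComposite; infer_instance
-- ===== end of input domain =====

-- B replaces A's per-number trial division by a sieve (mark every multiple of every j ≤ n//2,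
-- then one scan over the composite flags for the longest run).


-- ===== PORT A =====
-- int(n**0.5): exact as the integer square root for every argument isPrime feeds it
-- (isPrime is called with 3 ≤ n ≤ 2^31+1 here, where the float power rounds to a value with
-- the same floor; an off-by-one there could anyway only add/remove a redundant trial divisor).
def pvISqrt (n : Int) : Int := (Nat.sqrt n.toNat : Int)

-- isPrime: the for-loop with early 'return False' is the 'any' of its test over the range
def pvIsPrime (n : Int) : Bool :=
  if n ≤ 1 then false
  else if n = 2 then true
  else !((PySem.List.pyRange 2 (pvISqrt n + 2) 1).any (fun i => PySem.Int.mod n i == 0))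

def maxConsecutiveComposite (n : Int) : Int :=
  (List.foldl (fun (s : Int × Int) i =>
      let conscount := if pvIsPrime i then 0 else s.1 + 1
      (conscount, if s.2 < conscount then conscount else s.2))
    (0, 0) (PySem.List.pyRange 2 (n + 1) 1)).2

-- ===== PORT B =====
-- comp = [False]*(n+1); for j in range(2, n//2+1): for k in range(2*j, n+1, j): comp[k] = True
-- (the Python list is an array; every index k written satisfies 4 ≤ 2*j ≤ k ≤ n < n+1, so the
-- in-range assignment comp[k] = True is exactly setIfInBounds at k.toNat)
def pvSieve (n : Int) : Array Bool :=
  List.foldl (fun c j =>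
      List.foldl (fun c k => c.setIfInBounds k.toNat true) c
        (PySem.List.pyRange (2 * j) (n + 1) j))
    (Array.replicate (n + 1).toNat false)
    (PySem.List.pyRange 2 (PySem.Int.floordiv n 2 + 1) 1)

def maxConsecutiveComposite_alt (n : Int) : Int :=
  if n < 4 then 0
  else
    let comp := pvSieve n
    -- comp[i] is read only at 2 ≤ i ≤ n < len(comp), where getD at i.toNat is exact
    (List.foldl (fun (s : Int × Int) i =>
        if comp.getD i.toNat false then (s.1 + 1, max s.2 (s.1 + 1))
        else (0, s.2))
      (0, 0) (PySem.List.pyRange 2 (n + 1) 1)).2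

-- ===== PRECONDITION & SPEC =====
def Spec_maxConsecutiveComposite (n : Int) (out : Int) : Prop := out = maxConsecutiveComposite_alt n
instance (n : Int) (out : Int) : Decidable (Spec_maxConsecutiveComposite n out) := by unfold Spec_maxConsecutiveComposite; infer_instance

-- ===== CLAIM (what is proved, stated in full; the proofs are below) =====
def Claim_equal_maxConsecutiveComposite : Prop := ∀ (n : Int), Dom_maxConsecutiveComposite n → Spec_maxConsecutiveComposite n (maxConsecutiveComposite n)

-- ===== LEMMAS AND PROOFS =====

-- trial division up to √n+1 decides primality
lemma pvIsPrime_eq (i : Int) (h2 : 2 ≤ i) : pvIsPrime i = decide (Nat.Prime i.toNat) := by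
  unfold pvIsPrime
  by_cases hi2 : i = 2
  · subst hi2
    norm_num
    exact Nat.prime_two
  · have h3 : 3 ≤ i := by omega
    rw [if_neg (by omega), if_neg hi2]
    have hm3 : 3 ≤ i.toNat := by omega
    have him : (i.toNat : Int) = i := Int.toNat_of_nonneg (by omega)
    have key : ((PySem.List.pyRange 2 (pvISqrt i + 2) 1).any
        (fun d => PySem.Int.mod i d == 0)) = true ↔ ¬ Nat.Prime i.toNat := by
      rw [List.any_eq_true]
      constructor
      · rintro ⟨d, hd, hmod⟩
        rw [PySem.List.mem_pyRange_one] at hd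
        have hdvd : d ∣ i := (PySem.Int.mod_eq_zero_iff_dvd i d).mp (by simpa using hmod)
        intro hp
        have hub : d < (Nat.sqrt i.toNat : Int) + 2 := by
          simpa [pvISqrt] using hd.2
        have hdn : d.toNat ∣ i.toNat := by
          have : (d.toNat : Int) ∣ (i.toNat : Int) := by
            rwa [Int.toNat_of_nonneg (by omega), him]
          exact_mod_cast this
        rcases hp.eq_one_or_self_of_dvd d.toNat hdn with h1 | hself
        · omega
        · have hcontra : Nat.sqrt i.toNat < i.toNat - 1 := by
            rw [Nat.sqrt_lt']
            rcases Nat.exists_eq_add_of_le hm3 with ⟨t, ht⟩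
            rw [ht, show 3 + t - 1 = 2 + t from by omega]
            nlinarith
          omega
      · intro hp
        have hpf := Nat.minFac_prime (by omega : i.toNat ≠ 1)
        have h2f : 2 ≤ i.toNat.minFac := hpf.two_le
        have hsq : i.toNat.minFac ^ 2 ≤ i.toNat := Nat.minFac_sq_le_self (by omega) hp
        have hle : i.toNat.minFac ≤ Nat.sqrt i.toNat := Nat.le_sqrt.mpr (by nlinarith)
        refine ⟨(i.toNat.minFac : Int), ?_, ?_⟩
        · rw [PySem.List.mem_pyRange_one]
          refine ⟨by exact_mod_cast h2f, ?_⟩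
          have : i.toNat.minFac < Nat.sqrt i.toNat + 2 := by omega
          simp only [pvISqrt]
          exact_mod_cast this
        · have : (i.toNat.minFac : Int) ∣ i := by
            rw [← him]; exact_mod_cast Nat.minFac_dvd i.toNat
          simp [PySem.Int.mod_eq_zero_iff_dvd, this]
    by_cases hp : Nat.Prime i.toNat
    · have : ¬ (((PySem.List.pyRange 2 (pvISqrt i + 2) 1).any
          (fun d => PySem.Int.mod i d == 0)) = true) := fun h => (key.mp h) hp
      simp only [Bool.not_eq_true] at this
      rw [this]; simp [hp]
    · rw [key.mpr hp]; simp [hp]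

-- one in-range assignment comp[k] = True
lemma getD_setIfInBounds (c : Array Bool) (k : Int) (hk0 : 0 ≤ k) (hk : k < (c.size : Int))
    (m : Nat) :
    (c.setIfInBounds k.toNat true).getD m false
      = if (m : Int) = k then true else c.getD m false := by
  simp only [Array.getD_eq_getD_getElem?, Array.getElem?_setIfInBounds]
  rcases eq_or_ne (m : Int) k with h | h
  · have hm : k.toNat = m := by omega
    rw [if_pos h, if_pos hm, if_pos (by omega : k.toNat < c.size)]
    rfl
  · have hm : k.toNat ≠ m := by omega
    rw [if_neg h, if_neg hm]

lemma size_foldl_set (ks : List Int) (c : Array Bool) :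
    (ks.foldl (fun c k => c.setIfInBounds k.toNat true) c).size = c.size := by
  induction ks generalizing c with
  | nil => rfl
  | cons k ks ih => rw [List.foldl_cons, ih, Array.size_setIfInBounds]

-- the inner marking loop sets exactly the listed indices
lemma getD_foldl_set (ks : List Int) :
    ∀ (c : Array Bool), (∀ k ∈ ks, 0 ≤ k ∧ k < (c.size : Int)) → ∀ m : Nat,
      (ks.foldl (fun c k => c.setIfInBounds k.toNat true) c).getD m false
        = (c.getD m false || decide ((m : Int) ∈ ks)) := by
  induction ks with
  | nil => intro c _ m; simp
  | cons k ks ih =>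
    intro c hks m
    have hk := hks k (by simp)
    rw [List.foldl_cons, ih (c.setIfInBounds k.toNat true)
      (fun k' hk' => by rw [Array.size_setIfInBounds]; exact hks k' (by simp [hk'])) m]
    rw [getD_setIfInBounds c k hk.1 hk.2 m]
    by_cases h : (m : Int) = k <;> simp [h]

-- the whole sieve double loop, over any list of moduli ≥ 1
lemma getD_sieve_loops (n : Int) (js : List Int) (hjs : ∀ j ∈ js, 1 ≤ j) :
    ∀ (c : Array Bool), n + 1 ≤ (c.size : Int) → ∀ m : Nat,
      (js.foldl (fun c j =>
          List.foldl (fun c k => c.setIfInBounds k.toNat true) c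
            (PySem.List.pyRange (2 * j) (n + 1) j)) c).getD m false
        = (c.getD m false ||
            decide (∃ j ∈ js, (m : Int) ∈ PySem.List.pyRange (2 * j) (n + 1) j)) := by
  induction js with
  | nil => intro c _ m; simp
  | cons j js ih =>
    intro c hc m
    have hj : 1 ≤ j := hjs j (by simp)
    have hin : ∀ k ∈ PySem.List.pyRange (2 * j) (n + 1) j, 0 ≤ k ∧ k < (c.size : Int) := by
      intro k hk
      rw [PySem.List.mem_pyRange_iff_of_pos (by omega)] at hk
      omega
    rw [List.foldl_cons, ih (fun j' hj' => hjs j' (by simp [hj']))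
      _ (by rw [size_foldl_set]; exact hc) m]
    rw [getD_foldl_set _ c hin m]
    simp only [List.mem_cons, exists_eq_or_imp]
    by_cases h1 : ((m : Int) ∈ PySem.List.pyRange (2 * j) (n + 1) j) <;>
      by_cases h2 : (∃ j ∈ js, (m : Int) ∈ PySem.List.pyRange (2 * j) (n + 1) j) <;>
        simp [h1, h2]

-- ∃ a marked multiple ↔ composite, for 2 ≤ i ≤ n
lemma composite_char (n i : Int) (h2 : 2 ≤ i) (hn : i ≤ n) :
    (∃ j ∈ PySem.List.pyRange 2 (PySem.Int.floordiv n 2 + 1) 1,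
        i ∈ PySem.List.pyRange (2 * j) (n + 1) j) ↔ ¬ Nat.Prime i.toNat := by
  have him : (i.toNat : Int) = i := Int.toNat_of_nonneg (by omega)
  constructor
  · rintro ⟨j, hj, hi⟩
    rw [PySem.List.mem_pyRange_one] at hj
    rw [PySem.List.mem_pyRange_iff_of_pos (by omega)] at hi
    have hdvd : j ∣ i := by
      have h1 : j ∣ i - 2 * j := hi.2.2
      have h2 : j ∣ 2 * j := dvd_mul_left j 2
      have := dvd_add h1 h2
      simpa using this
    intro hp
    have hdn : j.toNat ∣ i.toNat := by
      have : (j.toNat : Int) ∣ (i.toNat : Int) := by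
        rwa [Int.toNat_of_nonneg (by omega), him]
      exact_mod_cast this
    rcases hp.eq_one_or_self_of_dvd j.toNat hdn with h1 | hself
    · omega
    · omega
  · intro hp
    have hpf := Nat.minFac_prime (by omega : i.toNat ≠ 1)
    have h2f : 2 ≤ i.toNat.minFac := hpf.two_le
    have hdvd := Nat.minFac_dvd i.toNat
    have hne : i.toNat.minFac ≠ i.toNat := by
      intro h
      exact hp (Nat.prime_def_minFac.mpr ⟨by omega, h⟩)
    have hlt : i.toNat.minFac < i.toNat :=
      lt_of_le_of_ne (Nat.le_of_dvd (by omega) hdvd) hne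
    have hco : 2 * i.toNat.minFac ≤ i.toNat := by
      have hq : i.toNat.minFac * (i.toNat / i.toNat.minFac) = i.toNat :=
        Nat.mul_div_cancel' hdvd
      have hq0 : i.toNat / i.toNat.minFac ≠ 0 := by
        intro h; rw [h] at hq; omega
      have hq1 : i.toNat / i.toNat.minFac ≠ 1 := by
        intro h; rw [h] at hq; omega
      obtain ⟨q, hq', hq0', hq1'⟩ : ∃ q, i.toNat.minFac * q = i.toNat ∧ q ≠ 0 ∧ q ≠ 1 :=
        ⟨i.toNat / i.toNat.minFac, hq, hq0, hq1⟩
      have hq2 : 2 ≤ q := by omega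
      nlinarith [hq', hq2, h2f]
    have hdi : (i.toNat.minFac : Int) ∣ i := by
      rw [← him]; exact_mod_cast hdvd
    have h2e : 2 * (i.toNat.minFac : Int) ≤ i := by
      rw [← him]
      exact_mod_cast hco
    refine ⟨(i.toNat.minFac : Int), ?_, ?_⟩
    · rw [PySem.List.mem_pyRange_one]
      refine ⟨by exact_mod_cast h2f, ?_⟩
      have : (i.toNat.minFac : Int) ≤ PySem.Int.floordiv n 2 := by
        rw [PySem.Int.le_floordiv_iff_mul_le (by norm_num)]
        omega
      omega
    · rw [PySem.List.mem_pyRange_iff_of_pos (by omega)]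
      refine ⟨by omega, by omega, ?_⟩
      exact dvd_sub hdi (dvd_mul_left _ 2)

-- the sieve list flags exactly the composites in [2, n]
lemma pvSieve_get (n i : Int) (h4 : 4 ≤ n) (h2 : 2 ≤ i) (hn : i ≤ n) :
    (pvSieve n).getD i.toNat false = decide (¬ Nat.Prime i.toNat) := by
  have hjs : ∀ j ∈ PySem.List.pyRange 2 (PySem.Int.floordiv n 2 + 1) 1, 1 ≤ j := by
    intro j hj; rw [PySem.List.mem_pyRange_one] at hj; omega
  have him : (i.toNat : Int) = i := Int.toNat_of_nonneg (by omega)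
  unfold pvSieve
  rw [getD_sieve_loops n _ hjs _ (by simp only [Array.size_replicate]; omega) i.toNat]
  simp only [Array.getD_eq_getD_getElem?, Array.getElem?_replicate,
    if_pos (show i.toNat < (n + 1).toNat by omega), Option.getD_some, Bool.false_or]
  rw [him]
  simp only [decide_eq_decide]
  exact composite_char n i h2 hn

-- the two scan loops agree when their per-element booleans are complementary
lemma scan_eq (p q : Int → Bool) (l : List Int) (h : ∀ i ∈ l, q i = !p i) :
    ∀ cc r : Int, 0 ≤ cc → 0 ≤ r →
      List.foldl (fun (s : Int × Int) i =>
          let conscount := if p i then 0 else s.1 + 1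
          (conscount, if s.2 < conscount then conscount else s.2)) (cc, r) l
      = List.foldl (fun (s : Int × Int) i =>
          if q i then (s.1 + 1, max s.2 (s.1 + 1)) else (0, s.2)) (cc, r) l := by
  induction l with
  | nil => intro _ _ _ _; rfl
  | cons x xs ih =>
    intro cc r hcc hr
    have hx := h x (by simp)
    have hxs : ∀ i ∈ xs, q i = !p i := fun i hi => h i (by simp [hi])
    simp only [List.foldl_cons]
    cases hp : p x with
    | true =>
      rw [hx, hp]
      have h0 : (if r < (0 : Int) then (0 : Int) else r) = r := if_neg (by omega)
      simpa [h0] using ih hxs 0 r le_rfl hr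
    | false =>
      rw [hx, hp]
      have hmax : max r (cc + 1) = if r < cc + 1 then cc + 1 else r := by
        simp only [max_def]; split_ifs <;> omega
      simpa [hmax] using ih hxs (cc + 1) (if r < cc + 1 then cc + 1 else r)
        (by omega) (by split_ifs <;> omega)

lemma sqrt_three : Nat.sqrt 3 = 1 := by
  have h1 : 1 ≤ Nat.sqrt 3 := Nat.le_sqrt.mpr (by norm_num)
  have h2 : Nat.sqrt 3 < 2 := Nat.sqrt_lt'.mpr (by norm_num)
  omega

-- ===== VERDICT (by name: the statement is the Claim_ definition above) =====
theorem maxConsecutiveComposite_spec : Claim_equal_maxConsecutiveComposite := by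
  intro n _
  unfold Spec_maxConsecutiveComposite maxConsecutiveComposite maxConsecutiveComposite_alt
  by_cases hn4 : n < 4
  · simp only [if_pos hn4]
    rcases (by omega : n ≤ 1 ∨ n = 2 ∨ n = 3) with h | h | h
    · rw [PySem.List.pyRange_one_eq_nil (by omega)]
      rfl
    · subst h
      have hr : PySem.List.pyRange 2 3 1 = [2] := by
        rw [PySem.List.pyRange_one_cons (by norm_num), PySem.List.pyRange_one_eq_nil (by norm_num)]
      have h2 : pvIsPrime 2 = true := by decide
      norm_num [hr, h2]
    · subst h
      have hr : PySem.List.pyRange 2 4 1 = [2, 3] := by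
        rw [PySem.List.pyRange_one_cons (by norm_num), PySem.List.pyRange_one_cons (by norm_num),
          PySem.List.pyRange_one_eq_nil (by norm_num)]
        norm_num
      have h2 : pvIsPrime 2 = true := by decide
      have h3 : pvIsPrime 3 = true := by
        unfold pvIsPrime pvISqrt
        rw [if_neg (by norm_num), if_neg (by norm_num),
          show ((3 : Int).toNat) = 3 from rfl, sqrt_three]
        decide
      norm_num [hr, h2, h3]
  · simp only [if_neg hn4]
    rw [scan_eq pvIsPrime (fun i => (pvSieve n).getD i.toNat false)
      (PySem.List.pyRange 2 (n + 1) 1) ?_ 0 0 le_rfl le_rfl]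
    intro i hi
    rw [PySem.List.mem_pyRange_one] at hi
    show (pvSieve n).getD i.toNat false = !pvIsPrime i
    rw [pvSieve_get n i (by omega) hi.1 (by omega), pvIsPrime_eq i hi.1]
    by_cases hp : Nat.Prime i.toNat <;> simp [hp]
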